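-- pv_equiv track=rewrite | github.com/dayusor/code-jam-practice | 2008/qualification/problem.py | spit_switch_times
-- ===== SOURCE A (Python) =====
-- def spit_switch_times(each_case_list, current_switch_times=0, biggest_one=0):
--     indexes_list = []
--     for j in range(0, len(each_case_list[0])):
--         try:
--             indexes_list.append(each_case_list[1].index(each_case_list[0][j]))
--         except ValueError:
--             return current_switch_times
--
--     biggest_one = max(indexes_list)
--     current_switch_times += 1
--     each_case_list[1] = each_case_list[1][biggest_one:]
--     return spit_switch_times(each_case_list, current_switch_times, biggest_one)
-- ===== SOURCE B (Python) =====
-- def spit_switch_times(each_case_list, current_switch_times=0, biggest_one=0):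
--     pattern = each_case_list[0]
--     seq = each_case_list[1]
--     count = current_switch_times
--     start = 0
--     while True:
--         needed = set(pattern)
--         m = None
--         for i in range(start, len(seq)):
--             if seq[i] in needed:
--                 needed.discard(seq[i])
--                 if not needed:
--                     m = i
--                     break
--         if m is None:
--             return count
--         count += 1
--         start = m
-- ===== Notes on version B (the rewrite author's own statement) =====
-- stated objective: alternative
-- what changed: Replaced the slice-and-recurse with per-element .index scans by an iterative offset-based loop that makes one left-to-right pass per round, shrinking a needed-set of the pattern's distinct elements and stopping at the position where it empties (= the max first index), with no list mutation or slicing.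
import Mathlib
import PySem

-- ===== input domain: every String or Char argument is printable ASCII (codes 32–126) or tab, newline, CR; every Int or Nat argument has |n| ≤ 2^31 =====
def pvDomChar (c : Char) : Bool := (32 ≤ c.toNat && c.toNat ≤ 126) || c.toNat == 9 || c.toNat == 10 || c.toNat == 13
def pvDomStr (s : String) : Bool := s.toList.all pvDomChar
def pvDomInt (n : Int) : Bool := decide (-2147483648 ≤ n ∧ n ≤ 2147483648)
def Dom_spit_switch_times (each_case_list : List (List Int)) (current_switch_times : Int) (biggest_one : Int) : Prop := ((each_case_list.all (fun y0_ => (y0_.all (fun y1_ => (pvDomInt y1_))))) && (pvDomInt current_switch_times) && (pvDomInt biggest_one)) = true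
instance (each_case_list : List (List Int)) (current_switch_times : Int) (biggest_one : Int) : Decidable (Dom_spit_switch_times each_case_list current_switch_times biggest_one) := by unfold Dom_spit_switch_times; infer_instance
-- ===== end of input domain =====

-- B replaces A's slice-and-recurse with per-element .index scans by an iterative offset loop making one
-- pass per round over the suffix with a shrinking needed-set (objective: alternative decomposition).
-- A mutates each_case_list[1] in place; B does not — the equivalence proved here is about the RETURN value only.

-- ===== PORT A =====
-- the 'for j in range(...): try: indexes_list.append(each_case_list[1].index(...)) except ValueError: return' loop:
-- returns none when some element is missing (the early 'return current_switch_times' branch)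
def pvA_collect (l0 l1 : List Int) : Option (List Nat) :=
  match l0 with
  | [] => some []
  | x :: rest =>
    match PySem.List.index? l1 x with
    | none => none
    | some i =>
      match pvA_collect rest l1 with
      | none => none
      | some t => some (i :: t)

-- the recursion of A; fuel (l1.length + 1) is enough under Pre_ (each round strictly shrinks l1)
def pvA_go : Nat → List Int → List Int → Int → Int
  | 0, _, _, cur => cur
  | fuel + 1, l0, l1, cur =>
    match pvA_collect l0 l1 with
    | none => cur
    | some idxs =>
      let big := (PySem.List.max? idxs (fun y => y)).getD 0   -- max(indexes_list); idxs ≠ [] under Pre_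
      pvA_go fuel l0 (PySem.List.slice l1 (some (big : Int)) none) (cur + 1)

def spit_switch_times (each_case_list : List (List Int)) (current_switch_times : Int) (biggest_one : Int) : Int :=
  match each_case_list with
  | l0 :: l1 :: _ => pvA_go (l1.length + 1) l0 l1 current_switch_times
  | _ => current_switch_times   -- Python raises IndexError here; excluded by Pre_

-- ===== PORT B =====
-- the 'for i in range(start, len(seq))' scan, transcribed over seq.drop start with the absolute index i carried along
def pvB_scan : PySem.Set Int → List Int → Nat → Option Nat
  | _, [], _ => none
  | needed, y :: rest, i =>
    if PySem.Set.contains needed y then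
      let needed' := PySem.Set.discard needed y
      if needed'.isEmpty then some i else pvB_scan needed' rest (i + 1)
    else pvB_scan needed rest (i + 1)

-- B's 'while True' loop; same fuel bound as A's port
def pvB_go : Nat → List Int → List Int → Int → Nat → Int
  | 0, _, _, count, _ => count
  | fuel + 1, pattern, seq, count, start =>
    match pvB_scan (PySem.Set.ofList pattern) (seq.drop start) start with
    | none => count
    | some m => pvB_go fuel pattern seq (count + 1) m

def spit_switch_times_alt (each_case_list : List (List Int)) (current_switch_times : Int) (biggest_one : Int) : Int :=
  match each_case_list with
  | l0 :: tail =>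
    match tail with
    | l1 :: _ => pvB_go (l1.length + 1) l0 l1 current_switch_times 0
    | [] => current_switch_times   -- Python raises IndexError here; excluded by Pre_
  | [] => current_switch_times   -- Python raises IndexError here; excluded by Pre_

-- ===== PRECONDITION & SPEC =====
-- Pre_ excludes exactly the inputs where Python A does not return: fewer than two inner lists (IndexError),
-- an empty first list (ValueError from max([])), and a constant first list whose value occurs in the second
-- list (infinite recursion: the slice never shrinks, ending in RecursionError).
def Pre_spit_switch_times (each_case_list : List (List Int)) (current_switch_times : Int) (biggest_one : Int) : Prop :=
  2 ≤ each_case_list.length ∧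
  each_case_list.getD 0 [] ≠ [] ∧
  ¬((∀ y ∈ each_case_list.getD 0 [], y = (each_case_list.getD 0 []).headI) ∧
    (each_case_list.getD 0 []).headI ∈ each_case_list.getD 1 [])
instance (each_case_list : List (List Int)) (current_switch_times : Int) (biggest_one : Int) : Decidable (Pre_spit_switch_times each_case_list current_switch_times biggest_one) := by unfold Pre_spit_switch_times; infer_instance

def pvWitness_spit_switch_times : List (List Int) × Int × Int := ([[1, 2], [2, 1, 2, 1]], 0, 0)

def Spec_spit_switch_times (each_case_list : List (List Int)) (current_switch_times : Int) (biggest_one : Int) (out : Int) : Prop := out = spit_switch_times_alt each_case_list current_switch_times biggest_one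
instance (each_case_list : List (List Int)) (current_switch_times : Int) (biggest_one : Int) (out : Int) : Decidable (Spec_spit_switch_times each_case_list current_switch_times biggest_one out) := by unfold Spec_spit_switch_times; infer_instance

-- ===== CLAIM (what is proved, stated in full; the proofs are below) =====
def Claim_equal_spit_switch_times : Prop := ∀ (each_case_list : List (List Int)) (current_switch_times : Int) (biggest_one : Int), Dom_spit_switch_times each_case_list current_switch_times biggest_one → Pre_spit_switch_times each_case_list current_switch_times biggest_one → Spec_spit_switch_times each_case_list current_switch_times biggest_one (spit_switch_times each_case_list current_switch_times biggest_one)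

-- ===== LEMMAS AND PROOFS =====

theorem pv_foldl_max_mem {f : Int → Nat} (s : List Int) (a : Nat) :
    s.foldl (fun acc x => max acc (f x)) a = a ∨ ∃ x ∈ s, s.foldl (fun acc x => max acc (f x)) a = f x := by
  induction s generalizing a with
  | nil => left; rfl
  | cons x t ih =>
    simp only [List.foldl_cons]
    rcases ih (max a (f x)) with h | ⟨y, hy, h⟩
    · rcases Nat.le_total a (f x) with hm | hm
      · right; exact ⟨x, List.mem_cons_self .., by rw [h, Nat.max_eq_right hm]⟩
      · left; rw [h, Nat.max_eq_left hm]
    · right; exact ⟨y, List.mem_cons_of_mem _ hy, h⟩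

theorem pv_foldl_max_shift_aux {f g : Int → Nat} (s : List Int) (a : Nat)
    (h : ∀ x ∈ s, f x = g x + 1) :
    s.foldl (fun acc x => max acc (f x)) (a + 1) = s.foldl (fun acc x => max acc (g x)) a + 1 := by
  induction s generalizing a with
  | nil => rfl
  | cons x t ih =>
    simp only [List.foldl_cons]
    rw [h x (List.mem_cons_self ..)]
    have e : max (a + 1) (g x + 1) = max a (g x) + 1 := by omega
    rw [e]
    exact ih _ (fun y hy => h y (List.mem_cons_of_mem _ hy))

theorem pv_foldl_max_shift {f g : Int → Nat} (s : List Int) (hne : s ≠ [])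
    (h : ∀ x ∈ s, f x = g x + 1) :
    s.foldl (fun acc x => max acc (f x)) 0 = s.foldl (fun acc x => max acc (g x)) 0 + 1 := by
  match s with
  | x :: t =>
    simp only [List.foldl_cons, Nat.zero_max]
    rw [h x (List.mem_cons_self ..)]
    exact pv_foldl_max_shift_aux t (g x) (fun y hy => h y (List.mem_cons_of_mem _ hy))

theorem pv_foldl_max_congr_members {f : Int → Nat} (s t : List Int)
    (h : ∀ x, x ∈ s ↔ x ∈ t) :
    s.foldl (fun acc x => max acc (f x)) 0 = t.foldl (fun acc x => max acc (f x)) 0 := by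
  have key : ∀ (u v : List Int), (∀ x, x ∈ u → x ∈ v) →
      u.foldl (fun acc x => max acc (f x)) 0 ≤ v.foldl (fun acc x => max acc (f x)) 0 := by
    intro u v huv
    rcases pv_foldl_max_mem (f := f) u 0 with h0 | ⟨x, hx, heq⟩
    · omega
    · rw [heq]
      exact (PySem.List.le_foldl_max_nat v f 0).2 x (huv x hx)
  exact Nat.le_antisymm (key s t (fun x => (h x).1)) (key t s (fun x => (h x).2))

theorem pv_idxOf?_of_mem (l : List Int) (x : Int) (h : x ∈ l) :
    List.idxOf? x l = some (l.idxOf x) := by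
  induction l with
  | nil => simp at h
  | cons y t ih =>
    by_cases hxy : y = x
    · subst hxy; simp [List.idxOf?_cons]
    · rcases List.mem_cons.1 h with h1 | h1
      · exact absurd h1.symm hxy
      · simp [List.idxOf?_cons, hxy, ih h1]

theorem pv_collect_none (l0 l1 : List Int) (h : ¬ ∀ x ∈ l0, x ∈ l1) :
    pvA_collect l0 l1 = none := by
  induction l0 with
  | nil => exact absurd (by simp) h
  | cons x rest ih =>
    by_cases hx : x ∈ l1
    · have hr : ¬ ∀ y ∈ rest, y ∈ l1 := by
        intro hall
        refine h ?_
        intro y hy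
        rcases List.mem_cons.1 hy with e | e
        · exact e ▸ hx
        · exact hall y e
      simp [pvA_collect, pv_idxOf?_of_mem l1 x hx, ih hr]
    · have : List.idxOf? x l1 = none := by
        rw [← PySem.List.index?_eq_idxOf?]
        exact (PySem.List.index?_eq_none_iff l1 x).2 hx
      simp [pvA_collect, this]

theorem pv_collect_some (l0 l1 : List Int) (h : ∀ x ∈ l0, x ∈ l1) :
    pvA_collect l0 l1 = some (l0.map (fun x => l1.idxOf x)) := by
  induction l0 with
  | nil => rfl
  | cons x rest ih =>
    have hx := h x (List.mem_cons_self ..)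
    simp [pvA_collect, pv_idxOf?_of_mem l1 x hx,
      ih (fun y hy => h y (List.mem_cons_of_mem _ hy))]

theorem pv_bigA (l0 l1 : List Int) (hne : l0 ≠ []) :
    ((PySem.List.max? (l0.map (fun x => l1.idxOf x)) (fun y => y)).getD 0)
      = l0.foldl (fun acc x => max acc (l1.idxOf x)) 0 := by
  match l0 with
  | x :: t =>
    simp only [List.map_cons, PySem.List.max?_id_cons, Option.getD_some]
    rw [List.foldl_map, List.foldl_cons, Nat.zero_max]

theorem pv_idxOf_cons_ne (x y : Int) (t : List Int) (h : x ≠ y) :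
    (y :: t).idxOf x = t.idxOf x + 1 := by
  simp [List.idxOf_cons, beq_false_of_ne (Ne.symm h)]

theorem pv_scan_none (L : List Int) : ∀ (s : PySem.Set Int) (i : Nat),
    (∃ x ∈ s, x ∉ L) → pvB_scan s L i = none := by
  induction L with
  | nil => intro s i h; rfl
  | cons y rest ih =>
    intro s i h
    obtain ⟨x, hxs, hxL⟩ := h
    have hxy : x ≠ y := fun e => hxL (e ▸ List.mem_cons_self ..)
    have hxrest : x ∉ rest := fun e => hxL (List.mem_cons_of_mem _ e)
    rw [pvB_scan]
    by_cases hy : y ∈ s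
    · rw [if_pos ((PySem.Set.contains_iff s y).2 hy)]
      have hmem : x ∈ PySem.Set.discard s y := (PySem.Set.mem_discard s y x).2 ⟨hxs, hxy⟩
      have hne : ¬ (PySem.Set.discard s y).isEmpty := by
        simp only [List.isEmpty_iff]
        intro e; rw [e] at hmem; simp at hmem
      rw [if_neg (by simpa using hne)]
      exact ih _ _ ⟨x, hmem, hxrest⟩
    · rw [if_neg (fun c => hy ((PySem.Set.contains_iff s y).1 c))]
      exact ih _ _ ⟨x, hxs, hxrest⟩

theorem pv_scan_some (L : List Int) : ∀ (s : PySem.Set Int) (i : Nat),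
    s.Nodup → s ≠ [] → (∀ x ∈ s, x ∈ L) →
    pvB_scan s L i = some (i + s.foldl (fun acc x => max acc (L.idxOf x)) 0) := by
  induction L with
  | nil =>
    intro s i hnd hne hall
    obtain ⟨x, hx⟩ := List.exists_mem_of_ne_nil s hne
    exact absurd (hall x hx) (List.not_mem_nil)
  | cons y rest ih =>
    intro s i hnd hne hall
    rw [pvB_scan]
    by_cases hy : y ∈ s
    · rw [if_pos ((PySem.Set.contains_iff s y).2 hy)]
      by_cases hemp : PySem.Set.discard s y = []
      · rw [if_pos (by simp [hemp])]
        have hall0 : ∀ x ∈ s, (y :: rest).idxOf x = 0 := by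
          intro x hx
          have hxy : x = y := by
            by_contra hne'
            have : x ∈ PySem.Set.discard s y := (PySem.Set.mem_discard s y x).2 ⟨hx, hne'⟩
            rw [hemp] at this; simp at this
          rw [hxy]; simp
        have hF : s.foldl (fun acc x => max acc ((y :: rest).idxOf x)) 0 = 0 := by
          rcases pv_foldl_max_mem (f := fun x => (y :: rest).idxOf x) s 0 with h0 | ⟨x, hx, hx0⟩
          · exact h0
          · rw [hx0, hall0 x hx]
        rw [hF]
        simp
      · rw [if_neg (by simp [hemp])]
        have hsub : ∀ x ∈ PySem.Set.discard s y, x ∈ rest := by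
          intro x hx
          obtain ⟨hxs, hxy⟩ := (PySem.Set.mem_discard s y x).1 hx
          rcases List.mem_cons.1 (hall x hxs) with e | e
          · exact absurd e hxy
          · exact e
        rw [ih _ (i + 1) (PySem.Set.nodup_discard s y hnd) hemp hsub]
        have hkey : s.foldl (fun acc x => max acc ((y :: rest).idxOf x)) 0
            = (PySem.Set.discard s y).foldl (fun acc x => max acc (rest.idxOf x)) 0 + 1 := by
          have hle1 : s.foldl (fun acc x => max acc ((y :: rest).idxOf x)) 0
              ≤ (PySem.Set.discard s y).foldl (fun acc x => max acc (rest.idxOf x)) 0 + 1 := by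
            rcases pv_foldl_max_mem (f := fun x => (y :: rest).idxOf x) s 0 with h0 | ⟨x, hx, hx0⟩
            · omega
            · rw [hx0]
              by_cases hxy : x = y
              · rw [hxy]; simp
              · rw [pv_idxOf_cons_ne x y rest hxy]
                have hx' : x ∈ PySem.Set.discard s y := (PySem.Set.mem_discard s y x).2 ⟨hx, hxy⟩
                have := (PySem.List.le_foldl_max_nat (PySem.Set.discard s y) (fun x => rest.idxOf x) 0).2 x hx'
                omega
          have hle2 : (PySem.Set.discard s y).foldl (fun acc x => max acc (rest.idxOf x)) 0 + 1
              ≤ s.foldl (fun acc x => max acc ((y :: rest).idxOf x)) 0 := by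
            rcases pv_foldl_max_mem (f := fun x => rest.idxOf x) (PySem.Set.discard s y) 0 with h0 | ⟨x, hx, hx0⟩
            · obtain ⟨x0, hx0⟩ := List.exists_mem_of_ne_nil _ hemp
              obtain ⟨hx0s, hx0y⟩ := (PySem.Set.mem_discard s y x0).1 hx0
              have := (PySem.List.le_foldl_max_nat s (fun x => (y :: rest).idxOf x) 0).2 x0 hx0s
              rw [pv_idxOf_cons_ne x0 y rest hx0y] at this
              omega
            · obtain ⟨hxs, hxy⟩ := (PySem.Set.mem_discard s y x).1 hx
              have := (PySem.List.le_foldl_max_nat s (fun x => (y :: rest).idxOf x) 0).2 x hxs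
              rw [pv_idxOf_cons_ne x y rest hxy] at this
              omega
          omega
        rw [hkey]
        congr 1
        omega
    · rw [if_neg (fun c => hy ((PySem.Set.contains_iff s y).1 c))]
      have hsub : ∀ x ∈ s, x ∈ rest := by
        intro x hx
        rcases List.mem_cons.1 (hall x hx) with e | e
        · exact absurd (e ▸ hx) hy
        · exact e
      rw [ih s (i + 1) hnd hne hsub]
      rw [pv_foldl_max_shift s hne (fun x hx => pv_idxOf_cons_ne x y rest (fun e => hy (e ▸ hx)))]
      congr 1
      omega

theorem pv_ofList_ne_nil (l0 : List Int) (h : l0 ≠ []) : PySem.Set.ofList l0 ≠ [] := by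
  match l0 with
  | x :: t => rw [PySem.Set.ofList_cons]; simp

theorem pv_go_eq (l0 : List Int) (hne : l0 ≠ []) : ∀ (fuel : Nat) (seq : List Int) (start : Nat) (cur : Int),
    pvA_go fuel l0 (seq.drop start) cur = pvB_go fuel l0 seq cur start := by
  intro fuel
  induction fuel with
  | zero => intro _ _ _; rfl
  | succ fuel ih =>
    intro seq start cur
    rw [pvA_go, pvB_go]
    by_cases hall : ∀ x ∈ l0, x ∈ seq.drop start
    · rw [pv_collect_some _ _ hall]
      have hall' : ∀ x ∈ PySem.Set.ofList l0, x ∈ seq.drop start := by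
        intro x hx
        exact hall x ((PySem.Set.mem_ofList l0 x).1 hx)
      rw [pv_scan_some _ _ _ (PySem.Set.nodup_ofList l0) (pv_ofList_ne_nil l0 hne) hall']
      simp only [pv_bigA _ _ hne]
      rw [pv_foldl_max_congr_members (f := fun x => (seq.drop start).idxOf x) l0 (PySem.Set.ofList l0)
        (fun x => (PySem.Set.mem_ofList l0 x).symm)]
      rw [PySem.List.slice_from_natCast, List.drop_drop]
      exact ih seq _ (cur + 1)
    · have hex : ∃ x ∈ PySem.Set.ofList l0, x ∉ seq.drop start := by
        push_neg at hall
        obtain ⟨x, hx, hxn⟩ := hall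
        exact ⟨x, (PySem.Set.mem_ofList l0 x).2 hx, hxn⟩
      rw [pv_collect_none _ _ hall, pv_scan_none _ _ _ hex]

-- ===== VERDICT (by name: the statement is the Claim_ definition above) =====
theorem spit_switch_times_spec : Claim_equal_spit_switch_times := by
  intro ecl cur big hdom hpre
  unfold Spec_spit_switch_times
  obtain ⟨hlen, hne, -⟩ := hpre
  match ecl, hlen with
  | l0 :: l1 :: rest, _ =>
    have hne0 : l0 ≠ [] := by simpa using hne
    show pvA_go (l1.length + 1) l0 l1 cur = pvB_go (l1.length + 1) l0 l1 cur 0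
    have := pv_go_eq l0 hne0 (l1.length + 1) l1 0 cur
    simpa using this
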